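-- pv_equiv track=rewrite | github.com/Prorise-cool/Prorise_ai_teach_workspace | packages/fastapi-backend/app/features/video/pipeline/engine/code_cleaner.py | clean_duplicate_imports
-- ===== SOURCE A (Python) =====
-- def clean_duplicate_imports(code: str) -> str:
--     """Remove duplicate `from manim import *` lines."""
--     lines = code.splitlines()
--     seen_manim_import = False
--     cleaned = []
--     for line in lines:
--         stripped = line.strip()
--         if stripped == "from manim import *":
--             if seen_manim_import:
--                 continue
--             seen_manim_import = True
--         cleaned.append(line)
--     return "\n".join(cleaned)
-- ===== SOURCE B (Python) =====
-- def clean_duplicate_imports(code: str) -> str: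
--     """Remove duplicate `from manim import *` lines."""
--     lines = code.splitlines()
--     first = None
--     for i, line in enumerate(lines):
--         if line.strip() == "from manim import *":
--             first = i
--             break
--     return "\n".join(
--         line
--         for i, line in enumerate(lines)
--         if line.strip() != "from manim import *" or i == first
--     )
-- ===== Notes on version B (the rewrite author's own statement) =====
-- stated objective: alternative
-- what changed: Replaces A's streaming seen-flag loop with a two-phase decomposition: first find the index of the first matching manim-import line, then filter the enumerated lines keeping a matching line only at that index.
import Mathlib
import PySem

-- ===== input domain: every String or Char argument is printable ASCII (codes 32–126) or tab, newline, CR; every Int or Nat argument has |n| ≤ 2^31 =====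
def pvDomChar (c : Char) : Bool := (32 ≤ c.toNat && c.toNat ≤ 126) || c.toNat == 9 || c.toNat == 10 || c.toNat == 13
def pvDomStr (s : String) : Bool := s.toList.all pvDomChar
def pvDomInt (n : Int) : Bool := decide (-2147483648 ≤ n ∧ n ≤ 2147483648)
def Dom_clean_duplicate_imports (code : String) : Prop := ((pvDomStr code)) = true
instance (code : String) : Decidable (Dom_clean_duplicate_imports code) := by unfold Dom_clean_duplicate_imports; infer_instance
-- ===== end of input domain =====

-- B replaces A's streaming 'seen' flag by first locating the index of the first
-- 'from manim import *' line and then filtering by index comparison (alternative decomposition, same cost).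

def pvTarget : String := "from manim import *"

-- ===== PORT A =====
def clean_duplicate_imports (code : String) : String :=
  let lines := PySem.Str.splitlines code
  let res := lines.foldl
    (fun (st : Bool × List String) line =>
      let stripped := PySem.Str.strip line
      if stripped == pvTarget then
        if st.1 then st else (true, st.2 ++ [line])
      else (st.1, st.2 ++ [line]))
    (false, [])
  PySem.Str.join "\n" res.2

-- ===== PORT B =====
def clean_duplicate_imports_alt (code : String) : String :=
  let lines := PySem.Str.splitlines code
  let first : Option Int :=
    ((PySem.List.enumerate lines).find? (fun p => PySem.Str.strip p.2 == pvTarget)).map (·.1)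
  PySem.Str.join "\n"
    (((PySem.List.enumerate lines).filter
        (fun p => (PySem.Str.strip p.2 != pvTarget) || (some p.1 == first))).map (·.2))

-- ===== PRECONDITION & SPEC =====
def Spec_clean_duplicate_imports (code : String) (out : String) : Prop := out = clean_duplicate_imports_alt code
instance (code : String) (out : String) : Decidable (Spec_clean_duplicate_imports code out) := by unfold Spec_clean_duplicate_imports; infer_instance

-- ===== CLAIM (what is proved, stated in full; the proofs are below) =====
def Claim_equal_clean_duplicate_imports : Prop := ∀ (code : String), Dom_clean_duplicate_imports code → Spec_clean_duplicate_imports code (clean_duplicate_imports code)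

-- ===== LEMMAS AND PROOFS =====

-- functional form of A's loop body
def fA : List String → Bool → List String
  | [], _ => []
  | l :: ls, b =>
    if PySem.Str.strip l == pvTarget then
      (if b then fA ls b else l :: fA ls true)
    else l :: fA ls b

theorem foldl_fA (ls : List String) (b : Bool) (acc : List String) :
    (ls.foldl
      (fun (st : Bool × List String) line =>
        let stripped := PySem.Str.strip line
        if stripped == pvTarget then
          if st.1 then st else (true, st.2 ++ [line])
        else (st.1, st.2 ++ [line]))
      (b, acc)).2 = acc ++ fA ls b := by
  induction ls generalizing b acc with
  | nil => simp [fA]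
  | cons l ls ih =>
    simp only [List.foldl_cons]
    by_cases h : (PySem.Str.strip l == pvTarget) = true
    · cases b with
      | true =>
        rw [if_pos h, if_pos rfl, ih]
        simp [fA, h]
      | false =>
        rw [if_pos h, if_neg (by simp), ih]
        simp [fA, h]
    · simp only [Bool.not_eq_true] at h
      rw [if_neg (by simp [h]), ih]
      simp [fA, h]

theorem fA_true (ls : List String) :
    fA ls true = ls.filter (fun l => PySem.Str.strip l != pvTarget) := by
  induction ls with
  | nil => rfl
  | cons l ls ih =>
    by_cases h : (PySem.Str.strip l == pvTarget) = true
    · have he : PySem.Str.strip l = pvTarget := by simpa using h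
      simp [fA, he, ih]
    · have he : ¬ PySem.Str.strip l = pvTarget := by simpa using h
      simp [fA, he, ih]

theorem filter_enum_snd (ls : List String) (s : Int) (q : String → Bool) :
    ((PySem.List.enumerate ls s).filter (fun p => q p.2)).map (·.2) = ls.filter q := by
  induction ls generalizing s with
  | nil => simp [PySem.List.enumerate_nil]
  | cons l ls ih =>
    by_cases h : q l = true
    · simp [PySem.List.enumerate_cons, h, ih]
    · simp only [Bool.not_eq_true] at h
      simp [PySem.List.enumerate_cons, h, ih]

theorem fA_false (ls : List String) (s : Int) :
    fA ls false =
      (((PySem.List.enumerate ls s).filter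
          (fun p => (PySem.Str.strip p.2 != pvTarget) ||
            (some p.1 ==
              (((PySem.List.enumerate ls s).find?
                  (fun p => PySem.Str.strip p.2 == pvTarget)).map (·.1))))).map (·.2)) := by
  induction ls generalizing s with
  | nil => simp [fA, PySem.List.enumerate_nil]
  | cons l ls ih =>
    rw [PySem.List.enumerate_cons]
    by_cases h : (PySem.Str.strip l == pvTarget) = true
    · -- head is the first match: index s; later indices differ from s
      rw [List.find?_cons_of_pos (by simpa using h)]
      rw [List.filter_cons]
      have hk : ((PySem.Str.strip (s, l).2 != pvTarget) ||
          (some (s, l).1 == (some (s, l)).map (·.1))) = true := by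
        simp
      rw [if_pos hk]
      have htail : ((PySem.List.enumerate ls (s + 1)).filter
          (fun p => (PySem.Str.strip p.2 != pvTarget) ||
            (some p.1 == (some (s, l)).map (·.1)))) =
          ((PySem.List.enumerate ls (s + 1)).filter
            (fun p => PySem.Str.strip p.2 != pvTarget)) := by
        apply List.filter_congr
        intro p hp
        rcases (PySem.List.mem_enumerate_iff _ _ _).1 hp with ⟨k, hk', rfl⟩
        have hne : (s + 1 + (k : Int)) ≠ s := by omega
        simp [hne]
      rw [htail, List.map_cons,
        filter_enum_snd ls (s + 1) (fun x => PySem.Str.strip x != pvTarget)]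
      simp [fA, h, fA_true]
    · -- head does not match: drop into the tail with start s+1
      have h' : (PySem.Str.strip l != pvTarget) = true := by simp_all
      rw [List.find?_cons_of_neg (by simpa using h)]
      rw [List.filter_cons]
      rw [if_pos (by simp [h'])]
      rw [List.map_cons]
      rw [show fA (l :: ls) false = l :: fA ls false by simp [fA, h]]
      rw [ih (s + 1)]

-- ===== VERDICT (by name: the statement is the Claim_ definition above) =====
theorem clean_duplicate_imports_spec : Claim_equal_clean_duplicate_imports := by
  intro code _
  unfold Spec_clean_duplicate_imports clean_duplicate_imports clean_duplicate_imports_alt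
  simp only
  rw [foldl_fA]
  rw [List.nil_append]
  rw [fA_false (PySem.Str.splitlines code) 0]
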